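-- pv_equiv track=rewrite | github.com/jubriltayo/number_classification | main.py | format_fun_fact
-- ===== SOURCE A (Python) =====
-- def is_armstrong(number: int) -> bool:
--     digits = str(number)
--     power = len(digits)
--     total = sum(int(d) ** power for d in digits)
--     return total == number
--
-- def format_fun_fact(number: int) -> str:
--     if is_armstrong(number):
--         digits = [int(d) for d in str(number)]
--         formatted_fact = f"{number} is an Armstrong number because " + " + ".join(
--             [f"{d}^{len(digits)}" for d in digits]
--         ) + f" = {number}"
--         return formatted_fact
--     return None
-- ===== SOURCE B (Python) =====
-- def _digits(n: int) -> list: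
--     """Digits of n most-significant first, by arithmetic recursion (no str scan)."""
--     return [n] if n < 10 else _digits(n // 10) + [n % 10]
--
-- def format_fun_fact(number: int) -> str:
--     ds = _digits(number)
--     p = len(ds)
--     if sum(d ** p for d in ds) != number:
--         return None
--     body = " + ".join(f"{d}^{p}" for d in ds)
--     return f"{number} is an Armstrong number because {body} = {number}"
-- ===== Notes on version B (the rewrite author's own statement) =====
-- stated objective: alternative
-- what changed: B extracts the digits by arithmetic recursion (n // 10, n % 10) instead of scanning str(number), formats each digit from the int itself, and uses an early-return guard instead of a separate is_armstrong helper over string characters.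
import Mathlib
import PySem

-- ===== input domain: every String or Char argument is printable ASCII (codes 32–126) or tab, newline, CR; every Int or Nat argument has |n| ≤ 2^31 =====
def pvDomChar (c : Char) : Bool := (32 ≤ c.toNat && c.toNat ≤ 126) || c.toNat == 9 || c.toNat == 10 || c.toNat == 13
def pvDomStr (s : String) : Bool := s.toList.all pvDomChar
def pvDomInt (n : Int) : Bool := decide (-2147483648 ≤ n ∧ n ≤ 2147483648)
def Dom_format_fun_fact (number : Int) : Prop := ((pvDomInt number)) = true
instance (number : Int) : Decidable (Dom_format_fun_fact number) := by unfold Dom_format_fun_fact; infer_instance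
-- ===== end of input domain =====

-- B extracts digits by arithmetic recursion (n // 10, n % 10) instead of A's scans over str(number); alternative decomposition, same value wherever A returns.

-- ===== PORT A =====
-- int(d) for a single digit char d is its code minus 48; exact on digit chars, and Pre_ (0 ≤ number)
-- guarantees every char of str(number) is a digit (Python raises ValueError on the '-' of a negative input).
def pvDigitVal (c : Char) : Int := (c.toNat : Int) - 48

-- is_armstrong, transliterated
def is_armstrong (number : Int) : Bool :=
  let digits := (PySem.Int.toStr number).toList
  let power := digits.length
  let total := (digits.map (fun d => pvDigitVal d ^ power)).sum
  total == number

def format_fun_fact (number : Int) : Option String :=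
  if is_armstrong number then
    let digits := (PySem.Int.toStr number).toList.map pvDigitVal
    some (PySem.Int.toStr number ++ " is an Armstrong number because " ++
      PySem.Str.join " + " (digits.map (fun d => PySem.Int.toStr d ++ "^" ++ PySem.Int.toStr digits.length)) ++
      " = " ++ PySem.Int.toStr number)
  else none

-- ===== PORT B =====
-- _digits, transliterated: [n] if n < 10 else _digits(n // 10) + [n % 10]
def pyDigits (n : Int) : List Int :=
  if n < 10 then [n]
  else pyDigits (PySem.Int.floordiv n 10) ++ [PySem.Int.mod n 10]
termination_by n.toNat
decreasing_by
  simp only [PySem.Int.floordiv]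
  rw [Int.fdiv_eq_ediv]
  simp
  omega

def format_fun_fact_alt (number : Int) : Option String :=
  let ds := pyDigits number
  let p := ds.length
  if (ds.map (fun d => d ^ p)).sum ≠ number then none
  else
    some (PySem.Int.toStr number ++ " is an Armstrong number because " ++
      PySem.Str.join " + " (ds.map (fun d => PySem.Int.toStr d ++ "^" ++ PySem.Int.toStr (p : Int))) ++
      " = " ++ PySem.Int.toStr number)

-- ===== PRECONDITION & SPEC =====
-- Pre_ excludes exactly the negative inputs, on which Python A raises ValueError (int('-')).
def Pre_format_fun_fact (number : Int) : Prop := 0 ≤ number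
instance (number : Int) : Decidable (Pre_format_fun_fact number) := by unfold Pre_format_fun_fact; infer_instance
def pvWitness_format_fun_fact : Int := (153)

def Spec_format_fun_fact (number : Int) (out : Option String) : Prop := out = format_fun_fact_alt number
instance (number : Int) (out : Option String) : Decidable (Spec_format_fun_fact number out) := by unfold Spec_format_fun_fact; infer_instance

-- ===== CLAIM =====
def Claim_equal_format_fun_fact : Prop := ∀ (number : Int), Dom_format_fun_fact number → Pre_format_fun_fact number → Spec_format_fun_fact number (format_fun_fact number)

-- ===== LEMMAS AND PROOFS =====

-- accumulator lemma for Nat.toDigitsCore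
theorem tdc_acc (f : Nat) : ∀ (n : Nat) (ds : List Char),
    Nat.toDigitsCore 10 f n ds = Nat.toDigitsCore 10 f n [] ++ ds := by
  induction f with
  | zero => intro n ds; simp [Nat.toDigitsCore]
  | succ f ih =>
    intro n ds
    simp only [Nat.toDigitsCore]
    split
    · simp
    · rw [ih (n / 10) [Nat.digitChar (n % 10)], ih (n / 10) (Nat.digitChar (n % 10) :: ds)]
      simp

-- fuel irrelevance for Nat.toDigitsCore
theorem tdc_fuel (f : Nat) : ∀ (f' n : Nat), n < f → n < f' →
    Nat.toDigitsCore 10 f n [] = Nat.toDigitsCore 10 f' n [] := by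
  induction f with
  | zero => intro f' n h; omega
  | succ f ih =>
    intro f' n h h'
    cases f' with
    | zero => omega
    | succ f' =>
      simp only [Nat.toDigitsCore]
      split
      · rfl
      · rename_i hne
        rw [tdc_acc f, tdc_acc f', ih f' (n / 10) (by omega) (by omega)]

theorem toDigits_lt (m : Nat) (h : m < 10) :
    Nat.toDigits 10 m = [Nat.digitChar m] := by
  simp [Nat.toDigits, Nat.toDigitsCore, Nat.div_eq_of_lt h, Nat.mod_eq_of_lt h]

theorem toDigits_ge (m : Nat) (h : 10 ≤ m) :
    Nat.toDigits 10 m = Nat.toDigits 10 (m / 10) ++ [Nat.digitChar (m % 10)] := by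
  have hne : m / 10 ≠ 0 := by omega
  rw [show Nat.toDigits 10 m = Nat.toDigitsCore 10 (m + 1) m [] from rfl]
  rw [show Nat.toDigitsCore 10 (m + 1) m [] =
      Nat.toDigitsCore 10 m (m / 10) [Nat.digitChar (m % 10)] from by
    simp only [Nat.toDigitsCore]; rw [if_neg hne]]
  rw [tdc_acc m (m / 10) [Nat.digitChar (m % 10)],
    tdc_fuel m (m / 10 + 1) (m / 10) (by omega) (by omega)]
  rfl

theorem pvDigitVal_digitChar (k : Nat) (h : k < 10) :
    pvDigitVal (Nat.digitChar k) = (k : Int) := by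
  interval_cases k <;> decide

-- B's arithmetic digits are the int values of A's string digits (nonnegative n)
theorem pyDigits_eq_map (m : Nat) :
    pyDigits (m : Int) = (Nat.toDigits 10 m).map pvDigitVal := by
  induction m using Nat.strong_induction_on with
  | _ m ih =>
    by_cases h : m < 10
    · rw [pyDigits, if_pos (by exact_mod_cast h), toDigits_lt m h]
      simp [pvDigitVal_digitChar m h]
    · replace h : 10 ≤ m := by omega
      rw [pyDigits, if_neg (by omega), toDigits_ge m h]
      have hfd : PySem.Int.floordiv (m : Int) 10 = ((m / 10 : Nat) : Int) := by
        simp only [PySem.Int.floordiv]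
        rw [Int.fdiv_eq_ediv]; simp
      have hfm : PySem.Int.mod (m : Int) 10 = ((m % 10 : Nat) : Int) := by
        simp only [PySem.Int.mod]
        rw [Int.fmod_eq_emod]; simp
      rw [hfd, hfm, ih (m / 10) (Nat.div_lt_self (by omega) (by norm_num))]
      simp [pvDigitVal_digitChar (m % 10) (Nat.mod_lt m (by norm_num))]

theorem toChars_nonneg (n : Int) (h : 0 ≤ n) :
    PySem.Int.toChars n = Nat.toDigits 10 n.toNat := by
  unfold PySem.Int.toChars
  rw [if_neg (by omega)]

theorem format_fun_fact_spec : Claim_equal_format_fun_fact := by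
  intro number _ hpre
  unfold Spec_format_fun_fact format_fun_fact format_fun_fact_alt is_armstrong
  simp only [PySem.Int.toList_toStr, toChars_nonneg number hpre]
  have hds : pyDigits number = (Nat.toDigits 10 number.toNat).map pvDigitVal := by
    have := pyDigits_eq_map number.toNat
    rwa [Int.toNat_of_nonneg hpre] at this
  rw [hds]
  simp only [List.map_map, List.length_map, beq_iff_eq, Function.comp_def]
  split <;> rename_i hcond
  · rw [if_neg (by simpa using hcond)]
  · rfl

-- ===== VERDICT ===== (theorem above states Claim_equal_format_fun_fact by name)
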